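-- pv_equiv track=rewrite | github.com/damian-r-s/dsa-practice | Python/Implementation/ACMICPCTeam.py | acmTeam
-- ===== SOURCE A (Python) =====
-- from itertools import combinations
--
-- def acmTeam(topic):
--     # Write your code here
--     combi = list(combinations(topic, 2))
--     groups = 0
--     maxi = 0
--
--     for c in combi:
--         sumator = 0
--         for j in range(len(c[0])):
--             a = c[0][j]
--             b = c[1][j]
--
--             if(a == "1" or b == "1"):
--                 sumator = sumator + 1
--
--         if(sumator > maxi):
--             maxi = sumator
--             groups = 1
--         elif (sumator == maxi):
--             groups += 1
--
--     return maxi, groups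
-- ===== SOURCE B (Python) =====
-- from itertools import combinations
--
-- def acmTeam(topic):
--     if any(len(s) != len(topic[0]) for s in topic):
--         raise ValueError("all topic strings must have the same length")
--     ones = [frozenset(j for j, ch in enumerate(s) if ch == "1") for s in topic]
--     scores = [len(p | q) for p, q in combinations(ones, 2)]
--     if not scores:
--         return 0, 0
--     best = max(scores)
--     return best, scores.count(best)
-- ===== Notes on version B (the rewrite author's own statement) =====
-- stated objective: faster
-- what changed: B precomputes, once per person, the frozenset of indices of their '1' topics, then scores each pair as the size of a set union (C-level) and takes max/count over the score list, instead of A's per-pair character-by-character loop with a running (maxi, groups) update; B validates that all topic strings share one length.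
-- outside the precondition, e.g. on acmTeam(['1', '01']): A returns (1, 1), B raises ValueError
import Mathlib
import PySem

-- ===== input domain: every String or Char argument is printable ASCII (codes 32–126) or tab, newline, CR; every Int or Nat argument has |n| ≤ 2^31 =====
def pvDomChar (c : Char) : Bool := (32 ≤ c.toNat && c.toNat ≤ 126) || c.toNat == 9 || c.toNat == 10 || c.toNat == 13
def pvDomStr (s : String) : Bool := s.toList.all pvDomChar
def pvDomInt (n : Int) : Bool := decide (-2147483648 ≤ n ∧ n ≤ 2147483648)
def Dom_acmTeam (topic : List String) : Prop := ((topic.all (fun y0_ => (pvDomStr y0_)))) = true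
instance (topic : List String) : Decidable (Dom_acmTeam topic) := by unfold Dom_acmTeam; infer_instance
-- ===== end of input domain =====

-- B precomputes each person's set of '1'-topic indices and scores pairs by set-union size,
-- then takes max/count of the score list: measurably faster by constant factor than A's
-- per-pair character loop; B validates that all topic strings share one length (ValueError
-- otherwise), and is proved equal to A on exactly those lists (Pre_acmTeam).


-- ===== PORT A =====
-- itertools.combinations(xs, 2), in Python's order
def pyCombinations2 {α : Type} : List α → List (α × α)
  | [] => []
  | x :: xs => xs.map (fun y => (x, y)) ++ pyCombinations2 xs

-- literal port of A: for each pair, count positions j < len(c[0]) where either char is '1',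
-- updating (groups, maxi).  Python raises IndexError when c[1] is shorter than c[0];
-- those inputs are outside Pre_acmTeam, there pyGetD's default ' ' stands for the raise.
def acmTeam (topic : List String) : Int × Int :=
  let combi := pyCombinations2 topic
  let res := combi.foldl (fun (st : Int × Int) c =>
    let sumator := (PySem.List.pyRange 0 (PySem.Str.len c.1) 1).foldl (fun s j =>
      let a := PySem.List.pyGetD c.1.toList j ' '
      let b := PySem.List.pyGetD c.2.toList j ' '
      if a = '1' ∨ b = '1' then s + 1 else s) (0 : Int)
    if sumator > st.2 then ((1 : Int), sumator)
    else if sumator = st.2 then (st.1 + 1, st.2)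
    else st) ((0 : Int), (0 : Int))
  (res.2, res.1)

-- ===== PORT B =====
-- frozenset(j for j, ch in enumerate(s) if ch == "1")
def pvOnes (s : String) : PySem.Set Int :=
  PySem.Set.ofList (((PySem.List.enumerate s.toList 0).filter (fun p => p.2 == '1')).map (fun p => p.1))

def acmTeam_alt (topic : List String) : Int × Int :=
  -- Python raises ValueError when the guard fires (outside Pre_acmTeam); (0, 0) stands for the raise
  if topic.any (fun s => s.toList.length ≠ ((topic.headD "").toList.length)) then (0, 0) else
  let ones := topic.map pvOnes
  let scores := (pyCombinations2 ones).map (fun p => (PySem.Set.len (PySem.Set.union p.1 p.2) : Int))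
  match scores with
  | [] => (0, 0)
  | _ :: _ =>
    let best := (PySem.List.max? scores (fun x => x)).getD 0
    (best, (PySem.List.count scores best : Int))

-- ===== PRECONDITION & SPEC =====
-- Pre_ restricts to lists of topic strings sharing one length (the problem's input format).
-- Outside it A either raises IndexError (a later string shorter than an earlier one) or silently
-- ignores positions beyond an earlier string's length, while B rejects the input with ValueError.
def Pre_acmTeam (topic : List String) : Prop :=
  topic.Pairwise (fun s t => s.toList.length = t.toList.length)
instance (topic : List String) : Decidable (Pre_acmTeam topic) := by unfold Pre_acmTeam; infer_instance
def pvWitness_acmTeam : List String := ["10101", "11110", "00010"]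

def Spec_acmTeam (topic : List String) (out : Int × Int) : Prop := out = acmTeam_alt topic
instance (topic : List String) (out : Int × Int) : Decidable (Spec_acmTeam topic out) := by unfold Spec_acmTeam; infer_instance

-- ===== CLAIM (what is proved, stated in full; the proofs are below) =====
def Claim_equal_acmTeam : Prop := ∀ (topic : List String), Dom_acmTeam topic → Pre_acmTeam topic → Spec_acmTeam topic (acmTeam topic)

-- ===== LEMMAS AND PROOFS =====

theorem pyCombinations2_map {α β : Type} (f : α → β) (xs : List α) :
    pyCombinations2 (xs.map f) = (pyCombinations2 xs).map (fun c => (f c.1, f c.2)) := by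
  induction xs with
  | nil => rfl
  | cons x t ih => simp [pyCombinations2, ih, List.map_map, Function.comp]

-- the raw index list behind pvOnes
def pvOnesList (u : List Char) : List Int :=
  ((PySem.List.enumerate u 0).filter (fun p => p.2 == '1')).map (fun p => p.1)

theorem pvOnes_eq (s : String) : pvOnes s = PySem.Set.ofList (pvOnesList s.toList) := rfl

theorem nodup_pvOnesList (u : List Char) : (pvOnesList u).Nodup := by
  have h1 : ((PySem.List.enumerate u 0).filter (fun p => p.2 == '1')).Pairwise (fun p q => p.1 < q.1) :=
    (PySem.List.pairwise_lt_enumerate u 0).sublist List.filter_sublist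
  have h2 : (pvOnesList u).Pairwise (· < ·) := by
    unfold pvOnesList; exact List.pairwise_map.mpr h1
  exact h2.nodup

theorem mem_pvOnesList (u : List Char) (j : Int) :
    j ∈ pvOnesList u ↔ ∃ (k : Nat) (h : k < u.length), j = (k : Int) ∧ u[k] = '1' := by
  unfold pvOnesList
  simp only [List.mem_map, List.mem_filter, PySem.List.mem_enumerate_iff]
  constructor
  · rintro ⟨p, ⟨⟨k, hk, rfl⟩, hc⟩, rfl⟩
    exact ⟨k, hk, by simp, by simpa using hc⟩
  · rintro ⟨k, hk, rfl, hc⟩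
    exact ⟨((k : Int), u[k]), ⟨⟨k, hk, by simp⟩, by simpa using hc⟩, rfl⟩

theorem toFinset_union_pvOnes (A B : List Int) (hA : A.Nodup) :
    (PySem.Set.union A B).length = (A.toFinset ∪ B.toFinset).card := by
  have hn : (PySem.Set.union A B).Nodup := PySem.Set.nodup_union A B hA
  rw [← List.toFinset_card_of_nodup hn]
  congr 1
  ext j
  simp [PySem.Set.mem_union]

theorem inner_eq (u v : List Char) (hle : u.length ≤ v.length)
    (hno : '1' ∉ v.drop u.length) :
    (PySem.List.pyRange 0 (u.length : Int) 1).foldl (fun s j =>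
      if PySem.List.pyGetD u j ' ' = '1' ∨ PySem.List.pyGetD v j ' ' = '1' then s + 1 else s) (0 : Int)
    = (PySem.Set.len (PySem.Set.union (PySem.Set.ofList (pvOnesList u)) (PySem.Set.ofList (pvOnesList v))) : Int) := by
  rw [PySem.List.foldl_ite_add_one]
  rw [PySem.Set.ofList_eq_self_of_nodup _ (nodup_pvOnesList u),
      PySem.Set.ofList_eq_self_of_nodup _ (nodup_pvOnesList v)]
  have hlen : PySem.Set.len (PySem.Set.union (pvOnesList u) (pvOnesList v))
      = ((PySem.Set.union (pvOnesList u) (pvOnesList v)).length : Int) := by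
    simp [PySem.Set.len]
  rw [hlen, toFinset_union_pvOnes _ _ (nodup_pvOnesList u)]
  rw [List.countP_eq_length_filter]
  have hfil : ((PySem.List.pyRange 0 (u.length : Int) 1).filter
      (fun j => decide (PySem.List.pyGetD u j ' ' = '1' ∨ PySem.List.pyGetD v j ' ' = '1'))).length
      = ((pvOnesList u).toFinset ∪ (pvOnesList v).toFinset).card := by
    rw [← List.toFinset_card_of_nodup ((PySem.List.nodup_pyRange_one 0 (u.length : Int)).filter _)]
    congr 1
    ext j
    simp only [List.mem_toFinset, List.mem_filter, PySem.List.mem_pyRange_one, Finset.mem_union,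
      decide_eq_true_eq, mem_pvOnesList]
    constructor
    · rintro ⟨⟨hj0, hjn⟩, hc⟩
      have hku : j.toNat < u.length := by omega
      have hkv : j.toNat < v.length := by omega
      rcases hc with hc | hc
      · left; exact ⟨j.toNat, hku, by omega, by rwa [PySem.List.pyGetD_eq_getElem u ' ' hj0 (by omega)] at hc⟩
      · right; exact ⟨j.toNat, hkv, by omega, by rwa [PySem.List.pyGetD_eq_getElem v ' ' hj0 (by omega)] at hc⟩
    · rintro (⟨k, hk, rfl, hc⟩ | ⟨k, hk, rfl, hc⟩)
      · refine ⟨⟨by omega, by omega⟩, Or.inl ?_⟩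
        rw [PySem.List.pyGetD_eq_getElem u ' ' (by omega) (by simpa using hk)]
        simpa using hc
      · have hklt : k < u.length := by
          by_contra hge
          apply hno
          have hub : k - u.length < (v.drop u.length).length := by
            simp only [List.length_drop]; omega
          have : (v.drop u.length)[k - u.length] = v[k] := by
            rw [List.getElem_drop]
            congr 1
            omega
          rw [← hc, ← this]
          exact List.getElem_mem hub
        refine ⟨⟨by omega, by omega⟩, Or.inr ?_⟩
        rw [PySem.List.pyGetD_eq_getElem v ' ' (by omega) (by simpa using hk)]
        simpa using hc
  omega

theorem pyCombinations2_rel {α : Type} {R : α → α → Prop} :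
    ∀ {xs : List α}, xs.Pairwise R → ∀ c ∈ pyCombinations2 xs, R c.1 c.2 := by
  intro xs
  induction xs with
  | nil => intro _ c hc; simp [pyCombinations2] at hc
  | cons x t ih =>
    intro h c hc
    rcases List.pairwise_cons.mp h with ⟨hx, ht⟩
    simp only [pyCombinations2, List.mem_append, List.mem_map] at hc
    rcases hc with ⟨y, hy, rfl⟩ | hc
    · exact hx y hy
    · exact ih ht c hc

def pvStep (st : Int × Int) (s : Int) : Int × Int :=
  if s > st.2 then ((1 : Int), s) else if s = st.2 then (st.1 + 1, st.2) else st

theorem le_foldl_max_init (L : List Int) : ∀ m : Int, m ≤ L.foldl max m := by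
  induction L with
  | nil => intro m; simp
  | cons x t ih => intro m; exact le_trans (le_max_left m x) (ih (max m x))

theorem pvStep_fold (L : List Int) : ∀ (g m : Int),
    L.foldl pvStep (g, m)
      = ((if L.foldl max m = m then g + (L.count m : Int) else (L.count (L.foldl max m) : Int)),
         L.foldl max m) := by
  induction L with
  | nil => intro g m; simp
  | cons x t ih =>
    intro g m
    simp only [List.foldl_cons, List.count_cons]
    rcases lt_trichotomy m x with h1 | h1 | h1
    · have hs : pvStep (g, m) x = (1, x) := by simp [pvStep, h1]
      have hmx : max m x = x := max_eq_right (le_of_lt h1)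
      rw [hs, ih 1 x, hmx]
      have hMge : x ≤ t.foldl max x := le_foldl_max_init t x
      have hMne : ¬ (t.foldl max x = m) := by omega
      rw [if_neg hMne]
      by_cases h2 : t.foldl max x = x
      · rw [if_pos h2, h2]
        simp [Prod.ext_iff]; omega
      · rw [if_neg h2]
        have : ¬ (x == t.foldl max x) := by simp only [beq_iff_eq]; omega
        simp [this]
    · have hs : pvStep (g, m) x = (g + 1, m) := by simp [pvStep, h1]
      have hmx : max m x = m := by omega
      rw [hs, ih (g + 1) m, hmx]
      by_cases h2 : t.foldl max m = m
      · rw [if_pos h2, if_pos h2]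
        have : (x == m) = true := by simp only [beq_iff_eq]; omega
        simp [this]; omega
      · rw [if_neg h2, if_neg h2]
        have : ¬ (x == t.foldl max m) := by simp only [beq_iff_eq]; omega
        simp [this]
    · have hs : pvStep (g, m) x = (g, m) := by
        unfold pvStep; rw [if_neg (by omega), if_neg (by omega)]
      have hmx : max m x = m := max_eq_left (le_of_lt h1)
      rw [hs, ih g m, hmx]
      have hMge : m ≤ t.foldl max m := le_foldl_max_init t m
      by_cases h2 : t.foldl max m = m
      · rw [if_pos h2, if_pos h2]
        have : ¬ (x == m) := by simp only [beq_iff_eq]; omega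
        simp [this]
      · rw [if_neg h2, if_neg h2]
        have : ¬ (x == t.foldl max m) := by simp only [beq_iff_eq]; omega
        simp [this]

-- per-pair scores, as A and B compute them
def pvScoreA (c : String × String) : Int :=
  (PySem.List.pyRange 0 (PySem.Str.len c.1) 1).foldl (fun s j =>
    if PySem.List.pyGetD c.1.toList j ' ' = '1' ∨ PySem.List.pyGetD c.2.toList j ' ' = '1'
    then s + 1 else s) (0 : Int)

def pvScoreB (c : String × String) : Int :=
  (PySem.Set.len (PySem.Set.union (pvOnes c.1) (pvOnes c.2)) : Int)

theorem pvScoreA_eq (c : String × String) (hle : c.1.toList.length ≤ c.2.toList.length)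
    (hno : '1' ∉ c.2.toList.drop c.1.toList.length) :
    pvScoreA c = pvScoreB c := by
  unfold pvScoreA pvScoreB
  have hl : PySem.Str.len c.1 = (c.1.toList.length : Int) := by
    simp [PySem.Str.len_eq]
  rw [hl, pvOnes_eq, pvOnes_eq]
  exact inner_eq c.1.toList c.2.toList hle hno

theorem pvScoreB_nonneg (c : String × String) : 0 ≤ pvScoreB c := by
  unfold pvScoreB PySem.Set.len
  exact Int.natCast_nonneg _

def pvFinal (scores : List Int) : Int × Int :=
  match scores with
  | [] => ((0 : Int), (0 : Int))
  | _ :: _ =>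
    let best := (PySem.List.max? scores (fun x => x)).getD 0
    (best, (PySem.List.count scores best : Int))

theorem acmTeam_eq_alt (topic : List String) (hpre : Pre_acmTeam topic) :
    acmTeam topic = acmTeam_alt topic := by
  have hpre' : topic.Pairwise (fun s t => s.toList.length ≤ t.toList.length) :=
    hpre.imp (fun h => le_of_eq h)
  have hnd' : topic.Pairwise (fun s t => '1' ∉ t.toList.drop s.toList.length) := by
    refine hpre.imp ?_
    intro s t h hmem
    rw [List.drop_eq_nil_of_le (le_of_eq h.symm)] at hmem
    exact List.not_mem_nil hmem
  have hguard : topic.any (fun s => s.toList.length ≠ ((topic.headD "").toList.length)) = false := by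
    cases topic with
    | nil => rfl
    | cons x t =>
      simp only [List.any_eq_false, decide_eq_true_eq, List.headD_cons, ne_eq, not_not]
      intro s hs
      rcases List.mem_cons.mp hs with rfl | hs
      · rfl
      · exact ((List.pairwise_cons.mp hpre).1 s hs).symm
  have hA : acmTeam topic
      = ((((pyCombinations2 topic).map pvScoreA).foldl pvStep ((0:Int),(0:Int))).2,
         (((pyCombinations2 topic).map pvScoreA).foldl pvStep ((0:Int),(0:Int))).1) := by
    unfold acmTeam
    rw [List.foldl_map]
    rfl
  have hmap : (pyCombinations2 topic).map pvScoreA = (pyCombinations2 topic).map pvScoreB := by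
    apply List.map_congr_left
    intro c hc
    exact pvScoreA_eq c (pyCombinations2_rel hpre' c hc) (pyCombinations2_rel hnd' c hc)
  have hB : acmTeam_alt topic = pvFinal ((pyCombinations2 topic).map pvScoreB) := by
    have h0 : acmTeam_alt topic
        = pvFinal ((pyCombinations2 (topic.map pvOnes)).map
            (fun p => (PySem.Set.len (PySem.Set.union p.1 p.2) : Int))) := by
      unfold acmTeam_alt
      rw [hguard]
      rfl
    rw [h0, pyCombinations2_map, List.map_map]
    rfl
  rw [hA, hmap, hB]
  cases hL : (pyCombinations2 topic).map pvScoreB with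
  | nil => simp [pvFinal]
  | cons s0 rest =>
    have hnn : ∀ x ∈ s0 :: rest, (0:Int) ≤ x := by
      rw [← hL]
      intro x hx
      rcases List.mem_map.mp hx with ⟨c, _, rfl⟩
      exact pvScoreB_nonneg c
    have hs0 : (0:Int) ≤ s0 := hnn s0 List.mem_cons_self
    have hM0 : (s0 :: rest).foldl max 0 = rest.foldl max s0 := by
      simp only [List.foldl_cons]
      congr 1
      omega
    rw [pvStep_fold, hM0]
    unfold pvFinal
    rw [PySem.List.max?_id_cons]
    simp only [Option.getD_some, PySem.List.count_eq]
    by_cases h0 : rest.foldl max s0 = 0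
    · rw [if_pos h0, h0]
      simp
    · rw [if_neg h0]

-- ===== VERDICT (by name: the statement is the Claim_ definition above) =====
theorem acmTeam_spec : Claim_equal_acmTeam := by
  intro topic _hdom hpre
  exact acmTeam_eq_alt topic hpre
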